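-- pv_equiv track=rewrite | github.com/tgeorge-engg/BachelorThesis | BachelorThesis/settings.py | create_processing_lists
-- ===== SOURCE A (Python) =====
-- feature_processing_info = {"Total Emotion Vectors":{"is_pair":False, "sub_name_list":['Angry', 'Disgust', 'Fear', 'Happy', 'Sad', 'Surprise', 'Neutral']},
--                            "Emotion Entropy":{"is_pair":False, "sub_name_list":None},
--                            "Emotion Synchronicity":{"is_pair":True, "sub_name_list":None},
--                            "Lip Movement":{"is_pair":False, "sub_name_list":None},
--                            "Interactions":{"is_pair":True, "sub_name_list":None},
--                            "People Proximities":{"is_pair":True, "sub_name_list":None},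
--                            "People Synchronicity":{"is_pair":True, "sub_name_list":None},
--                            "Activeness":{"is_pair":False, "sub_name_list":None}}
--
-- def create_processing_lists(extracted_feature_names, people_names):
--     extracted_sub_feature_names = []
--     extracted_feature_data = []
--     extraction_feature_inds = []
--     acc=0
--
--     for i in range(len(extracted_feature_names)):
--         feature_details_i = feature_processing_info[extracted_feature_names[i]]
--         sub_feature_names_i = []
--         feature_data_i = []
--         feature_inds_i = []
--
--         if feature_details_i["is_pair"]:
--             for j in range(len(people_names)-1):
--                 for k in range(j+1,len(people_names)):
--                     name_jk = f"{people_names[j]}-{people_names[k]}"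
--                     if feature_details_i["sub_name_list"] is not None:
--                         for sub_name in feature_details_i["sub_name_list"]:
--                             sub_feature_names_i.append(f"{name_jk}: {sub_name}")
--                             feature_data_i.append([])
--                             feature_inds_i.append(acc)
--                             acc+=1
--                     else:
--                         sub_feature_names_i.append(name_jk)
--                         feature_data_i.append([])
--                         feature_inds_i.append(acc)
--                         acc+=1
--         else:
--             for j in range(len(people_names)):
--                 name_j = people_names[j]
--
--                 if feature_details_i["sub_name_list"] is not None:
--                     for sub_name in feature_details_i["sub_name_list"]:
--                         sub_feature_names_i.append(f"{name_j}: {sub_name}")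
--                         feature_data_i.append([])
--                         feature_inds_i.append(acc)
--                         acc+=1
--                 else:
--                     sub_feature_names_i.append(name_j)
--                     feature_data_i.append([])
--                     feature_inds_i.append(acc)
--                     acc+=1
--
--         extracted_sub_feature_names.append(sub_feature_names_i)
--         extracted_feature_data.append(feature_data_i)
--         extraction_feature_inds.append(feature_inds_i)
--
--     return extracted_sub_feature_names, extracted_feature_data, extraction_feature_inds
-- ===== SOURCE B (Python) =====
-- from itertools import combinations, accumulate
--
-- feature_processing_info = {"Total Emotion Vectors":{"is_pair":False, "sub_name_list":['Angry', 'Disgust', 'Fear', 'Happy', 'Sad', 'Surprise', 'Neutral']},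
--                            "Emotion Entropy":{"is_pair":False, "sub_name_list":None},
--                            "Emotion Synchronicity":{"is_pair":True, "sub_name_list":None},
--                            "Lip Movement":{"is_pair":False, "sub_name_list":None},
--                            "Interactions":{"is_pair":True, "sub_name_list":None},
--                            "People Proximities":{"is_pair":True, "sub_name_list":None},
--                            "People Synchronicity":{"is_pair":True, "sub_name_list":None},
--                            "Activeness":{"is_pair":False, "sub_name_list":None}}
--
-- def create_processing_lists(extracted_feature_names, people_names):
--     n = len(people_names)
--     infos = [feature_processing_info[f] for f in extracted_feature_names]
--     # slot count of each feature, by arithmetic (no name enumeration):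
--     # a pair feature has n*(n-1)//2 units, a plain one n; each unit yields
--     # len(sub_name_list) slots (1 when it is None).
--     sizes = [(n * (n - 1) // 2 if d["is_pair"] else n) *
--              (len(d["sub_name_list"]) if d["sub_name_list"] is not None else 1)
--              for d in infos]
--     offsets = [0] + list(accumulate(sizes))
--     bounds = list(zip(offsets, offsets[1:]))
--     # one flat stream of all names, across all features
--     flat = []
--     for d in infos:
--         units = ["-".join(p) for p in combinations(people_names, 2)] if d["is_pair"] else people_names
--         subs = d["sub_name_list"]
--         if subs is None:
--             flat.extend(units)
--         else:
--             flat.extend(u + ": " + s for u in units for s in subs)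
--     # nesting, data slots and indices are all derived from the bounds alone
--     names = [flat[lo:hi] for lo, hi in bounds]
--     data = [[[] for _ in range(sz)] for sz in sizes]
--     inds = [list(range(lo, hi)) for lo, hi in bounds]
--     return names, data, inds
-- ===== Notes on version B (the rewrite author's own statement) =====
-- stated objective: alternative
-- what changed: Instead of A's interleaved triple-append loop, B computes each feature's slot count arithmetically (n*(n-1)//2 units for pair features), derives the index lists and data slots purely from prefix-sum offsets of those counts, and produces all names as one flat stream that is then sliced into per-feature chunks at those offsets.
import Mathlib
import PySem

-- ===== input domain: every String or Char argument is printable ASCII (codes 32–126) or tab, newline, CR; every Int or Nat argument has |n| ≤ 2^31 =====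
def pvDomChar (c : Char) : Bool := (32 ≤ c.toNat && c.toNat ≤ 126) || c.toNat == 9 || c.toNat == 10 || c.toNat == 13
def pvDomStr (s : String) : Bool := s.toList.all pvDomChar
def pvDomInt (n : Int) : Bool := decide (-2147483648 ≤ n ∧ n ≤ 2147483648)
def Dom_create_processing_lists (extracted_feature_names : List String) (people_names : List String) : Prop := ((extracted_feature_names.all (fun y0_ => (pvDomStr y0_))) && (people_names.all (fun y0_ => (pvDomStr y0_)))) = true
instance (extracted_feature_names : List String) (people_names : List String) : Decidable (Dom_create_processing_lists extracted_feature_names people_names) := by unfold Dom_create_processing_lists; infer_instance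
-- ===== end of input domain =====

-- B computes each feature's slot count by arithmetic (n*(n-1)//2 units for pair features), derives
-- the index lists and empty data slots purely from prefix-sum offsets of those counts, and emits all
-- names as one flat stream that is sliced into per-feature chunks at those offsets, instead of A's
-- single interleaved triple-append index-loop; objective: a different algorithm, same cost.

-- ===== PORT A =====

-- the module-level dict 'feature_processing_info' (value = (is_pair, sub_name_list))
def featureInfo : PySem.Dict String (Bool × Option (List String)) :=
  PySem.Dict.ofList
    [("Total Emotion Vectors", (false, some ["Angry", "Disgust", "Fear", "Happy", "Sad", "Surprise", "Neutral"])),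
     ("Emotion Entropy", (false, none)),
     ("Emotion Synchronicity", (true, none)),
     ("Lip Movement", (false, none)),
     ("Interactions", (true, none)),
     ("People Proximities", (true, none)),
     ("People Synchronicity", (true, none)),
     ("Activeness", (false, none))]

def create_processing_lists (extracted_feature_names : List String) (people_names : List String) : List (List String) × List (List (List Int)) × List (List Int) :=
  -- outer state: (extracted_sub_feature_names, extracted_feature_data, extraction_feature_inds, acc);
  -- per feature the inner state is (sub_feature_names_i, feature_data_i, feature_inds_i, acc)
  let r :=
    (PySem.List.pyRange 0 (PySem.List.len extracted_feature_names) 1).foldl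
      (fun st i =>
        let fd := featureInfo.getD (PySem.List.pyGetD extracted_feature_names i "") (false, none)
        let inner :=
          if fd.1 then
            (PySem.List.pyRange 0 (PySem.List.len people_names - 1) 1).foldl
              (fun s j =>
                (PySem.List.pyRange (j + 1) (PySem.List.len people_names) 1).foldl
                  (fun s k =>
                    let name_jk := PySem.List.pyGetD people_names j "" ++ "-" ++ PySem.List.pyGetD people_names k ""
                    match fd.2 with
                    | some subs =>
                        subs.foldl
                          (fun s sub =>
                            (s.1 ++ [name_jk ++ ": " ++ sub], s.2.1 ++ [([] : List Int)],
                              s.2.2.1 ++ [s.2.2.2], s.2.2.2 + 1)) s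
                    | none =>
                        (s.1 ++ [name_jk], s.2.1 ++ [([] : List Int)], s.2.2.1 ++ [s.2.2.2], s.2.2.2 + 1))
                  s)
              (([] : List String), ([] : List (List Int)), ([] : List Int), st.2.2.2)
          else
            (PySem.List.pyRange 0 (PySem.List.len people_names) 1).foldl
              (fun s j =>
                let name_j := PySem.List.pyGetD people_names j ""
                match fd.2 with
                | some subs =>
                    subs.foldl
                      (fun s sub =>
                        (s.1 ++ [name_j ++ ": " ++ sub], s.2.1 ++ [([] : List Int)],
                          s.2.2.1 ++ [s.2.2.2], s.2.2.2 + 1)) s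
                | none =>
                    (s.1 ++ [name_j], s.2.1 ++ [([] : List Int)], s.2.2.1 ++ [s.2.2.2], s.2.2.2 + 1))
              (([] : List String), ([] : List (List Int)), ([] : List Int), st.2.2.2)
        (st.1 ++ [inner.1], st.2.1 ++ [inner.2.1], st.2.2.1 ++ [inner.2.2.1], inner.2.2.2))
      (([] : List (List String)), ([] : List (List (List Int))), ([] : List (List Int)), (0 : Int))
  (r.1, r.2.1, r.2.2.1)

-- ===== PORT B =====

-- itertools.combinations(xs, 2), in order
def combos2 (xs : List String) : List (String × String) :=
  match xs with
  | [] => []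
  | x :: rest => rest.map (fun y => (x, y)) ++ combos2 rest

def create_processing_lists_alt (extracted_feature_names : List String) (people_names : List String) : List (List String) × List (List (List Int)) × List (List Int) :=
  let n : Int := PySem.List.len people_names
  let infos := extracted_feature_names.map (fun f => featureInfo.getD f (false, none))
  -- slot count of each feature, by arithmetic
  let sizes := infos.map (fun d =>
    (if d.1 then PySem.Int.floordiv (n * (n - 1)) 2 else n) *
    (match d.2 with | some subs => PySem.List.len subs | none => 1))
  -- offsets = [0] + list(accumulate(sizes)) : the prefix sums, as List.scanl
  let offsets := List.scanl (· + ·) (0 : Int) sizes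
  let bounds := offsets.zip (offsets.drop 1)
  -- one flat stream of all names, across all features ('-'.join of a 2-tuple is p.1 ++ "-" ++ p.2)
  let flat := infos.foldl (fun acc d =>
    let units := if d.1 then (combos2 people_names).map (fun p => p.1 ++ "-" ++ p.2) else people_names
    match d.2 with
    | none => acc ++ units
    | some subs => acc ++ units.flatMap (fun u => subs.map (fun s => u ++ ": " ++ s))) []
  let names := bounds.map (fun b => PySem.List.slice flat (some b.1) (some b.2))
  let data := sizes.map (fun sz => (PySem.List.pyRange 0 sz 1).map (fun _ => ([] : List Int)))
  let inds := bounds.map (fun b => PySem.List.pyRange b.1 b.2 1)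
  (names, data, inds)

-- ===== PRECONDITION & SPEC =====
-- Pre_ excludes exactly the inputs on which the Python A raises KeyError: a feature name that is
-- not a key of feature_processing_info (B raises the same KeyError there).
def Pre_create_processing_lists (extracted_feature_names : List String) (people_names : List String) : Prop :=
  ∀ f ∈ extracted_feature_names,
    f ∈ ["Total Emotion Vectors", "Emotion Entropy", "Emotion Synchronicity", "Lip Movement",
         "Interactions", "People Proximities", "People Synchronicity", "Activeness"]
instance (extracted_feature_names : List String) (people_names : List String) : Decidable (Pre_create_processing_lists extracted_feature_names people_names) := by unfold Pre_create_processing_lists; infer_instance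
def pvWitness_create_processing_lists : List String × List String :=
  (["Total Emotion Vectors", "Interactions"], ["alice", "bob", "carol"])

def Spec_create_processing_lists (extracted_feature_names : List String) (people_names : List String) (out : List (List String) × List (List (List Int)) × List (List Int)) : Prop := out = create_processing_lists_alt extracted_feature_names people_names
instance (extracted_feature_names : List String) (people_names : List String) (out : List (List String) × List (List (List Int)) × List (List Int)) : Decidable (Spec_create_processing_lists extracted_feature_names people_names out) := by unfold Spec_create_processing_lists; infer_instance

-- ===== CLAIM (what is proved, stated in full; the proofs are below) =====
def Claim_equal_create_processing_lists : Prop := ∀ (extracted_feature_names : List String) (people_names : List String), Dom_create_processing_lists extracted_feature_names people_names → Pre_create_processing_lists extracted_feature_names people_names → Spec_create_processing_lists extracted_feature_names people_names (create_processing_lists extracted_feature_names people_names)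

-- ===== LEMMAS AND PROOFS =====

-- the per-feature inner state of A
abbrev StI := List String × List (List Int) × List Int × Int

-- A's repeated "append name / append [] / append acc / acc += 1" block
def pushA (s : StI) (nm : String) : StI :=
  (s.1 ++ [nm], s.2.1 ++ [([] : List Int)], s.2.2.1 ++ [s.2.2.2], s.2.2.2 + 1)

-- A's "if sub_name_list is not None" block, for one unit name
def stepA (o : Option (List String)) (s : StI) (u : String) : StI :=
  match o with
  | some subs => subs.foldl (fun s sub => pushA s (u ++ ": " ++ sub)) s
  | none => pushA s u

-- the names one unit contributes
def entriesOf (o : Option (List String)) (u : String) : List String :=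
  match o with
  | none => [u]
  | some subs => subs.map (fun sub => u ++ ": " ++ sub)

def indsOf (acc : Int) (n : Nat) : List Int := (List.range n).map (fun t : Nat => acc + (t : Int))

def indsAll (acc : Int) : List (List String) → List (List Int)
  | [] => []
  | sub :: rest => indsOf acc sub.length :: indsAll (acc + sub.length) rest

-- the name list of one feature
def namesB (fd : Bool × Option (List String)) (ppl : List String) : List String :=
  (if fd.1 then (combos2 ppl).map (fun p => p.1 ++ "-" ++ p.2) else ppl).flatMap (entriesOf fd.2)

lemma stepA_eq (o : Option (List String)) (s : StI) (u : String) :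
    stepA o s u = (entriesOf o u).foldl pushA s := by
  cases o with
  | none => rfl
  | some subs => simp [stepA, entriesOf, List.foldl_map]

lemma foldl_stepA (o : Option (List String)) (U : List String) (s : StI) :
    U.foldl (stepA o) s = (U.flatMap (entriesOf o)).foldl pushA s := by
  induction U generalizing s with
  | nil => rfl
  | cons u U ih => simp [List.foldl_append, ih, stepA_eq]

lemma indsOf_succ (acc : Int) (n : Nat) :
    indsOf acc (n + 1) = acc :: indsOf (acc + 1) n := by
  unfold indsOf
  rw [List.range_succ_eq_map, List.map_cons, List.map_map]
  congr 1
  · simp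
  · apply List.map_congr_left
    intro t _
    simp only [Function.comp_apply, Nat.succ_eq_add_one]
    push_cast
    ring

lemma foldl_pushA (NL : List String) (a : List String) (b : List (List Int)) (c : List Int) (acc : Int) :
    NL.foldl pushA (a, b, c, acc) =
      (a ++ NL, b ++ NL.map (fun _ => ([] : List Int)), c ++ indsOf acc NL.length, acc + (NL.length : Int)) := by
  induction NL generalizing a b c acc with
  | nil => simp [indsOf]
  | cons nm NL ih =>
    show NL.foldl pushA (a ++ [nm], b ++ [[]], c ++ [acc], acc + 1) = _
    rw [ih]
    simp [indsOf_succ, List.append_assoc]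
    ring_nf

-- the Nat-indexed form of A's pair double loop
def pairFoldN {S : Type} (g : S → String → S) (ppl : List String) (s : S) : S :=
  (List.range (ppl.length - 1)).foldl
    (fun s j => (ppl.drop (j + 1)).foldl (fun s y => g s (ppl.getD j "" ++ "-" ++ y)) s) s

lemma pairFoldN_eq_combos {S : Type} (g : S → String → S) (ppl : List String) (s : S) :
    pairFoldN g ppl s = (combos2 ppl).foldl (fun s p => g s (p.1 ++ "-" ++ p.2)) s := by
  induction ppl generalizing s with
  | nil => rfl
  | cons x xs ih =>
    cases xs with
    | nil => rfl
    | cons y t =>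
      show (List.range ((x :: y :: t).length - 1)).foldl _ s = _
      rw [show (x :: y :: t).length - 1 = t.length + 1 from by simp]
      rw [List.range_succ_eq_map, List.foldl_cons, List.foldl_map]
      have hrest : ∀ s' : S, (List.range t.length).foldl
            (fun s (j : Nat) => ((x :: y :: t).drop (j.succ + 1)).foldl
              (fun s y' => g s ((x :: y :: t).getD j.succ "" ++ "-" ++ y')) s) s'
          = pairFoldN g (y :: t) s' := by
        intro s'
        unfold pairFoldN
        simp only [List.drop_succ_cons, List.getD_cons_succ, List.length_cons,
          Nat.add_sub_cancel, Nat.succ_eq_add_one]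
      rw [hrest, ih]
      show _ = ((y :: t).map (fun y' => (x, y')) ++ combos2 (y :: t)).foldl _ s
      rw [List.foldl_append, List.foldl_map]
      simp

lemma pairA_eq {S : Type} (g : S → String → S) (ppl : List String) (s0 : S) :
    (PySem.List.pyRange 0 (PySem.List.len ppl - 1) 1).foldl
      (fun s j =>
        (PySem.List.pyRange (j + 1) (PySem.List.len ppl) 1).foldl
          (fun s k => g s (PySem.List.pyGetD ppl j "" ++ "-" ++ PySem.List.pyGetD ppl k "")) s) s0
    = (combos2 ppl).foldl (fun s p => g s (p.1 ++ "-" ++ p.2)) s0 := by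
  have h1 : (PySem.List.pyRange 0 (PySem.List.len ppl - 1) 1).foldl
      (fun s j =>
        (PySem.List.pyRange (j + 1) (PySem.List.len ppl) 1).foldl
          (fun s k => g s (PySem.List.pyGetD ppl j "" ++ "-" ++ PySem.List.pyGetD ppl k "")) s) s0
      = (PySem.List.pyRange 0 (PySem.List.len ppl - 1) 1).foldl
      (fun s j =>
        (ppl.drop (j + 1).toNat).foldl
          (fun s y => g s (PySem.List.pyGetD ppl j "" ++ "-" ++ y)) s) s0 := by
    apply PySem.List.foldl_congr_mem
    intro acc x hx
    have hx0 : (0 : Int) ≤ x := (PySem.List.mem_pyRange_one.mp hx).1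
    rw [← PySem.List.map_pyGetD_pyRange (xs := ppl) (a := x + 1) (d := "") (by omega),
      List.foldl_map]
  rw [h1, PySem.List.pyRange_one, List.foldl_map]
  have hlen : (PySem.List.len ppl - 1 - 0).toNat = ppl.length - 1 := by
    simp only [PySem.List.len_eq]
    omega
  rw [hlen, ← pairFoldN_eq_combos]
  unfold pairFoldN
  apply PySem.List.foldl_congr_mem
  intro acc k _
  have ha : ((0 : Int) + (k : Int) + 1).toNat = k + 1 := by omega
  have hb : ((0 : Int) + (k : Int)) = ((k : Nat) : Int) := by omega
  rw [ha, hb, PySem.List.pyGetD_natCast]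

-- A's inner loop for a pair feature, characterized
lemma innerPair_eq (o : Option (List String)) (ppl : List String) (acc : Int) :
    (PySem.List.pyRange 0 (PySem.List.len ppl - 1) 1).foldl
      (fun s j =>
        (PySem.List.pyRange (j + 1) (PySem.List.len ppl) 1).foldl
          (fun (s : StI) k =>
            let name_jk := PySem.List.pyGetD ppl j "" ++ "-" ++ PySem.List.pyGetD ppl k ""
            match o with
            | some subs =>
                subs.foldl
                  (fun s sub =>
                    (s.1 ++ [name_jk ++ ": " ++ sub], s.2.1 ++ [([] : List Int)],
                      s.2.2.1 ++ [s.2.2.2], s.2.2.2 + 1)) s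
            | none =>
                (s.1 ++ [name_jk], s.2.1 ++ [([] : List Int)], s.2.2.1 ++ [s.2.2.2], s.2.2.2 + 1))
          s)
      (([] : List String), ([] : List (List Int)), ([] : List Int), acc)
    = (namesB (true, o) ppl, (namesB (true, o) ppl).map (fun _ => ([] : List Int)),
        indsOf acc (namesB (true, o) ppl).length, acc + ((namesB (true, o) ppl).length : Int)) := by
  have step1 : (PySem.List.pyRange 0 (PySem.List.len ppl - 1) 1).foldl
      (fun s j =>
        (PySem.List.pyRange (j + 1) (PySem.List.len ppl) 1).foldl
          (fun (s : StI) k => stepA o s (PySem.List.pyGetD ppl j "" ++ "-" ++ PySem.List.pyGetD ppl k "")) s)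
      (([] : List String), ([] : List (List Int)), ([] : List Int), acc)
      = (combos2 ppl).foldl (fun s p => stepA o s (p.1 ++ "-" ++ p.2))
          (([] : List String), ([] : List (List Int)), ([] : List Int), acc) :=
    pairA_eq (stepA o) ppl _
  refine Eq.trans (step1) ?_
  have step2 : ((combos2 ppl).map (fun p => p.1 ++ "-" ++ p.2)).foldl (stepA o)
      (([] : List String), ([] : List (List Int)), ([] : List Int), acc)
      = (combos2 ppl).foldl (fun s p => stepA o s (p.1 ++ "-" ++ p.2))
          (([] : List String), ([] : List (List Int)), ([] : List Int), acc) :=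
    List.foldl_map
  rw [← step2, foldl_stepA, foldl_pushA]
  simp [namesB]

-- A's inner loop for a non-pair feature, characterized
lemma innerNonpair_eq (o : Option (List String)) (ppl : List String) (acc : Int) :
    (PySem.List.pyRange 0 (PySem.List.len ppl) 1).foldl
      (fun (s : StI) j =>
        let name_j := PySem.List.pyGetD ppl j ""
        match o with
        | some subs =>
            subs.foldl
              (fun s sub =>
                (s.1 ++ [name_j ++ ": " ++ sub], s.2.1 ++ [([] : List Int)],
                  s.2.2.1 ++ [s.2.2.2], s.2.2.2 + 1)) s
        | none =>
            (s.1 ++ [name_j], s.2.1 ++ [([] : List Int)], s.2.2.1 ++ [s.2.2.2], s.2.2.2 + 1))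
      (([] : List String), ([] : List (List Int)), ([] : List Int), acc)
    = (namesB (false, o) ppl, (namesB (false, o) ppl).map (fun _ => ([] : List Int)),
        indsOf acc (namesB (false, o) ppl).length, acc + ((namesB (false, o) ppl).length : Int)) := by
  have step1 : (PySem.List.pyRange 0 (PySem.List.len ppl) 1).foldl
      (fun (s : StI) j => stepA o s (PySem.List.pyGetD ppl j ""))
      (([] : List String), ([] : List (List Int)), ([] : List Int), acc)
      = ppl.foldl (stepA o) (([] : List String), ([] : List (List Int)), ([] : List Int), acc) :=
    PySem.List.foldl_pyRange_zero_pyGetD ppl "" (stepA o) _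
  refine Eq.trans (step1) ?_
  rw [foldl_stepA, foldl_pushA]
  simp [namesB]

-- A's loop body over one feature name (the port's outer body with the indexed element abstracted)
def outerBody (ppl : List String)
    (st : List (List String) × List (List (List Int)) × List (List Int) × Int)
    (fname : String) : List (List String) × List (List (List Int)) × List (List Int) × Int :=
  (fun inner : StI =>
    (st.1 ++ [inner.1], st.2.1 ++ [inner.2.1], st.2.2.1 ++ [inner.2.2.1], inner.2.2.2))
  (if (featureInfo.getD fname (false, none)).1 then
      (PySem.List.pyRange 0 (PySem.List.len ppl - 1) 1).foldl
        (fun s j =>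
          (PySem.List.pyRange (j + 1) (PySem.List.len ppl) 1).foldl
            (fun (s : StI) k =>
              let name_jk := PySem.List.pyGetD ppl j "" ++ "-" ++ PySem.List.pyGetD ppl k ""
              match (featureInfo.getD fname (false, none)).2 with
              | some subs =>
                  subs.foldl
                    (fun s sub =>
                      (s.1 ++ [name_jk ++ ": " ++ sub], s.2.1 ++ [([] : List Int)],
                        s.2.2.1 ++ [s.2.2.2], s.2.2.2 + 1)) s
              | none =>
                  (s.1 ++ [name_jk], s.2.1 ++ [([] : List Int)], s.2.2.1 ++ [s.2.2.2], s.2.2.2 + 1))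
            s)
        (([] : List String), ([] : List (List Int)), ([] : List Int), st.2.2.2)
    else
      (PySem.List.pyRange 0 (PySem.List.len ppl) 1).foldl
        (fun (s : StI) j =>
          let name_j := PySem.List.pyGetD ppl j ""
          match (featureInfo.getD fname (false, none)).2 with
          | some subs =>
              subs.foldl
                (fun s sub =>
                  (s.1 ++ [name_j ++ ": " ++ sub], s.2.1 ++ [([] : List Int)],
                    s.2.2.1 ++ [s.2.2.2], s.2.2.2 + 1)) s
          | none =>
              (s.1 ++ [name_j], s.2.1 ++ [([] : List Int)], s.2.2.1 ++ [s.2.2.2], s.2.2.2 + 1))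
        (([] : List String), ([] : List (List Int)), ([] : List Int), st.2.2.2))

lemma portA_eq (efn ppl : List String) :
    create_processing_lists efn ppl =
      (fun r : List (List String) × List (List (List Int)) × List (List Int) × Int =>
        (r.1, r.2.1, r.2.2.1)) (efn.foldl (outerBody ppl) ([], [], [], 0)) := by
  show (fun r : List (List String) × List (List (List Int)) × List (List Int) × Int =>
        (r.1, r.2.1, r.2.2.1))
      ((PySem.List.pyRange 0 (PySem.List.len efn) 1).foldl
        (fun st i => outerBody ppl st (PySem.List.pyGetD efn i "")) ([], [], [], 0)) = _
  exact congrArg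
    (fun r : List (List String) × List (List (List Int)) × List (List Int) × Int =>
      (r.1, r.2.1, r.2.2.1))
    (PySem.List.foldl_pyRange_zero_pyGetD efn "" (outerBody ppl) ([], [], [], 0))

lemma outerBody_eq (ppl : List String)
    (st : List (List String) × List (List (List Int)) × List (List Int) × Int) (fname : String) :
    outerBody ppl st fname =
      (st.1 ++ [namesB (featureInfo.getD fname (false, none)) ppl],
       st.2.1 ++ [(namesB (featureInfo.getD fname (false, none)) ppl).map (fun _ => ([] : List Int))],
       st.2.2.1 ++ [indsOf st.2.2.2 (namesB (featureInfo.getD fname (false, none)) ppl).length],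
       st.2.2.2 + ((namesB (featureInfo.getD fname (false, none)) ppl).length : Int)) := by
  unfold outerBody
  rcases h : featureInfo.getD fname (false, none) with ⟨b, o⟩
  rw [show ((b, o) : Bool × Option (List String)).1 = b from rfl,
    show ((b, o) : Bool × Option (List String)).2 = o from rfl]
  cases b with
  | true =>
    rw [if_pos rfl, innerPair_eq o ppl st.2.2.2]
  | false =>
    rw [if_neg (by simp), innerNonpair_eq o ppl st.2.2.2]

-- A's whole outer loop, characterized
lemma mainA (ppl : List String) (efn : List String)
    (NS : List (List String)) (DS : List (List (List Int))) (IS : List (List Int)) (acc : Int) :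
    efn.foldl (outerBody ppl) (NS, DS, IS, acc) =
      (NS ++ efn.map (fun f => namesB (featureInfo.getD f (false, none)) ppl),
       DS ++ (efn.map (fun f => namesB (featureInfo.getD f (false, none)) ppl)).map
               (fun sub => sub.map (fun _ => ([] : List Int))),
       IS ++ indsAll acc (efn.map (fun f => namesB (featureInfo.getD f (false, none)) ppl)),
       acc + (((efn.map (fun f => namesB (featureInfo.getD f (false, none)) ppl)).map List.length).sum : Int)) := by
  induction efn generalizing NS DS IS acc with
  | nil => simp [indsAll]
  | cons f efn ih =>
    rw [List.foldl_cons, outerBody_eq, ih]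
    simp [indsAll, List.append_assoc]
    ring_nf

-- ===== B-side lemmas =====

-- |combos2 xs| = C(|xs|, 2)
lemma combos2_length (xs : List String) :
    2 * (combos2 xs).length = xs.length * (xs.length - 1) := by
  induction xs with
  | nil => rfl
  | cons x rest ih =>
    rw [combos2, List.length_append, List.length_map, List.length_cons, Nat.add_sub_cancel]
    cases hr : rest.length with
    | zero =>
      rw [hr] at ih
      omega
    | succ m =>
      rw [hr, Nat.add_sub_cancel] at ih
      have h1 : (m + 1 + 1) * (m + 1) = (m + 1) * m + 2 * (m + 1) := by ring
      linarith

-- entries per unit is constant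
lemma entriesOf_length (o : Option (List String)) (u : String) :
    (entriesOf o u).length = (match o with | some subs => subs.length | none => 1) := by
  cases o <;> simp [entriesOf]

lemma flatMap_entriesOf_length (o : Option (List String)) (us : List String) :
    (us.flatMap (entriesOf o)).length =
      us.length * (match o with | some subs => subs.length | none => 1) := by
  induction us with
  | nil => simp
  | cons u us ih => simp [List.flatMap_cons, ih, entriesOf_length, Nat.add_mul, Nat.add_comm]

-- the floor-divided pair formula counts the combinations
lemma floordiv_combos (ppl : List String) :
    PySem.Int.floordiv ((PySem.List.len ppl) * (PySem.List.len ppl - 1)) 2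
      = ((combos2 ppl).length : Int) := by
  rw [PySem.Int.floordiv_eq_ediv_of_pos (by omega)]
  have h := combos2_length ppl
  have h2 : (PySem.List.len ppl) * (PySem.List.len ppl - 1) = 2 * ((combos2 ppl).length : Int) := by
    simp only [PySem.List.len_eq]
    cases hp : ppl.length with
    | zero =>
      rw [hp] at h
      have hc0 : (combos2 ppl).length = 0 := by omega
      rw [hc0]
      norm_num
    | succ m =>
      rw [hp] at h
      have hZ : (2 : Int) * ((combos2 ppl).length : Int) = ((m : Int) + 1) * (m : Int) := by
        have hN : 2 * (combos2 ppl).length = (m + 1) * m := by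
          have : m + 1 - 1 = m := by omega
          rw [this] at h; exact h
        exact_mod_cast hN
      push_cast
      linear_combination -hZ
  rw [h2, Int.mul_ediv_cancel_left _ (by omega)]

-- B's arithmetic size formula equals the length of the feature's name list
lemma sizeE_eq (d : Bool × Option (List String)) (ppl : List String) :
    (if d.1 then PySem.Int.floordiv ((PySem.List.len ppl) * (PySem.List.len ppl - 1)) 2
     else PySem.List.len ppl) *
      (match d.2 with | some subs => PySem.List.len subs | none => 1)
    = ((namesB d ppl).length : Int) := by
  rcases d with ⟨b, o⟩
  cases b with
  | false =>
    cases o with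
    | none =>
      show PySem.List.len ppl * 1 = _
      rw [show namesB (false, none) ppl = ppl.flatMap (entriesOf none) from rfl,
        flatMap_entriesOf_length]
      simp [PySem.List.len_eq]
    | some subs =>
      show PySem.List.len ppl * PySem.List.len subs = _
      rw [show namesB (false, some subs) ppl = ppl.flatMap (entriesOf (some subs)) from rfl,
        flatMap_entriesOf_length]
      simp only [PySem.List.len_eq]
      push_cast
      ring
  | true =>
    cases o with
    | none =>
      show PySem.Int.floordiv ((PySem.List.len ppl) * (PySem.List.len ppl - 1)) 2 * 1 = _
      rw [show namesB (true, none) ppl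
          = ((combos2 ppl).map (fun p => p.1 ++ "-" ++ p.2)).flatMap (entriesOf none) from rfl,
        flatMap_entriesOf_length, floordiv_combos]
      simp
    | some subs =>
      show PySem.Int.floordiv ((PySem.List.len ppl) * (PySem.List.len ppl - 1)) 2
          * PySem.List.len subs = _
      rw [show namesB (true, some subs) ppl
          = ((combos2 ppl).map (fun p => p.1 ++ "-" ++ p.2)).flatMap (entriesOf (some subs)) from rfl,
        flatMap_entriesOf_length, floordiv_combos]
      simp only [PySem.List.len_eq, List.length_map]
      push_cast
      ring

-- B's flat loop is the flattened concatenation of the per-feature name lists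
lemma flatB_eq (infos : List (Bool × Option (List String))) (ppl : List String)
    (acc0 : List String) :
    infos.foldl (fun acc d =>
      let units := if d.1 then (combos2 ppl).map (fun p => p.1 ++ "-" ++ p.2) else ppl
      match d.2 with
      | none => acc ++ units
      | some subs => acc ++ units.flatMap (fun u => subs.map (fun s => u ++ ": " ++ s))) acc0
    = acc0 ++ (infos.map (fun d => namesB d ppl)).flatten := by
  induction infos generalizing acc0 with
  | nil => simp
  | cons d infos ih =>
    rw [List.foldl_cons, ih]
    have hbody : (let units := if d.1 then (combos2 ppl).map (fun p => p.1 ++ "-" ++ p.2) else ppl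
        match d.2 with
        | none => acc0 ++ units
        | some subs => acc0 ++ units.flatMap (fun u => subs.map (fun s => u ++ ": " ++ s)))
        = acc0 ++ namesB d ppl := by
      rcases d with ⟨b, o⟩
      cases o with
      | none =>
        show acc0 ++ _ = acc0 ++ _
        rw [namesB]
        exact congrArg _ (List.flatMap_singleton' _).symm
      | some subs => rfl
    rw [hbody]
    simp [List.append_assoc]

-- slicing the flat stream at the prefix-sum offsets recovers the chunks
lemma sliceChunks (L : List (List String)) (P : List String) :
    (((List.scanl (· + ·) ((P.length : Nat) : Int) (L.map (fun l => ((l.length : Nat) : Int)))).zip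
      ((List.scanl (· + ·) ((P.length : Nat) : Int) (L.map (fun l => ((l.length : Nat) : Int)))).drop 1)).map
      (fun b => PySem.List.slice (P ++ L.flatten) (some b.1) (some b.2))) = L := by
  induction L generalizing P with
  | nil => simp
  | cons l rest ih =>
    rw [List.map_cons, List.scanl_cons]
    have hadd : ((P.length : Nat) : Int) + ((l.length : Nat) : Int) = (((P ++ l).length : Nat) : Int) := by
      simp
    rw [hadd]
    rcases hsc : List.scanl (· + ·) (((P ++ l).length : Nat) : Int)
        (rest.map (fun l => ((l.length : Nat) : Int))) with _ | ⟨b, t⟩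
    · exact absurd (congrArg List.length hsc) (by simp)
    · have hb : b = (((P ++ l).length : Nat) : Int) := by
        have := congrArg (fun xs => xs.headD 0) hsc
        simpa using this.symm
      rw [List.drop_succ_cons, List.drop_zero, hsc, List.zip_cons_cons, List.map_cons]
      refine congrArg₂ List.cons ?_ ?_
      · show PySem.List.slice (P ++ (l :: rest).flatten)
            (some ((P.length : Nat) : Int)) (some b) = l
        rw [hb, ← hadd, PySem.List.slice_natCast_add]
        rw [List.flatten_cons, List.drop_left, List.take_left]
      · have htail := ih (P ++ l)
        rw [hsc, List.drop_succ_cons, List.drop_zero] at htail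
        rw [show (P ++ l) ++ rest.flatten = P ++ (l :: rest).flatten by simp] at htail
        exact htail

-- the pyRanges over the prefix-sum bounds are the consecutive index lists
lemma pyRange_indsOf (acc : Int) (n : Nat) :
    PySem.List.pyRange acc (acc + (n : Int)) 1 = indsOf acc n := by
  have h : (acc + (n : Int) - acc).toNat = n := by omega
  rw [PySem.List.pyRange_one, h]
  unfold indsOf
  apply List.map_congr_left
  intro t _
  omega

lemma indsChunks (L : List (List String)) (acc : Int) :
    (((List.scanl (· + ·) acc (L.map (fun l => ((l.length : Nat) : Int)))).zip
      ((List.scanl (· + ·) acc (L.map (fun l => ((l.length : Nat) : Int)))).drop 1)).map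
      (fun b => PySem.List.pyRange b.1 b.2 1)) = indsAll acc L := by
  induction L generalizing acc with
  | nil => simp [indsAll]
  | cons l rest ih =>
    rw [List.map_cons, List.scanl_cons]
    rcases hsc : List.scanl (· + ·) (acc + ((l.length : Nat) : Int))
        (rest.map (fun l => ((l.length : Nat) : Int))) with _ | ⟨b, t⟩
    · exact absurd (congrArg List.length hsc) (by simp)
    · have hb : b = acc + ((l.length : Nat) : Int) := by
        have := congrArg (fun xs => xs.headD 0) hsc
        simpa using this.symm
      rw [List.drop_succ_cons, List.drop_zero, hsc, List.zip_cons_cons, List.map_cons]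
      rw [indsAll]
      refine congrArg₂ List.cons ?_ ?_
      · rw [hb, pyRange_indsOf]
      · have htail := ih (acc + ((l.length : Nat) : Int))
        rw [hsc, List.drop_succ_cons, List.drop_zero] at htail
        exact htail

-- B's data pass: one empty list per slot of each chunk
lemma dataChunk (l : List String) :
    (PySem.List.pyRange 0 ((l.length : Nat) : Int) 1).map (fun _ => ([] : List Int))
      = l.map (fun _ => ([] : List Int)) := by
  have hlen : (PySem.List.pyRange 0 ((l.length : Nat) : Int) 1).length = l.length := by
    rw [PySem.List.pyRange_one]
    simp
  rw [List.map_const', List.map_const', hlen]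

-- ===== VERDICT (by name: the statement is the Claim_ definition above) =====
theorem create_processing_lists_spec : Claim_equal_create_processing_lists := by
  intro efn ppl _hDom _hPre
  show create_processing_lists efn ppl = create_processing_lists_alt efn ppl
  rw [portA_eq, mainA]
  simp only [create_processing_lists_alt]
  have hsizes : (efn.map (fun f => featureInfo.getD f (false, none))).map
      (fun d =>
        (if d.1 then PySem.Int.floordiv ((PySem.List.len ppl) * (PySem.List.len ppl - 1)) 2
         else PySem.List.len ppl) *
          (match d.2 with | some subs => PySem.List.len subs | none => 1))
      = (efn.map (fun f => namesB (featureInfo.getD f (false, none)) ppl)).map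
          (fun l => ((l.length : Nat) : Int)) := by
    rw [List.map_map, List.map_map]
    apply List.map_congr_left
    intro f _
    exact sizeE_eq _ ppl
  have hflat : (efn.map (fun f => featureInfo.getD f (false, none))).foldl
      (fun acc d =>
        let units := if d.1 then (combos2 ppl).map (fun p => p.1 ++ "-" ++ p.2) else ppl
        match d.2 with
        | none => acc ++ units
        | some subs => acc ++ units.flatMap (fun u => subs.map (fun s => u ++ ": " ++ s))) []
      = (efn.map (fun f => namesB (featureInfo.getD f (false, none)) ppl)).flatten := by
    rw [flatB_eq, List.map_map]
    rfl
  rw [hsizes, hflat]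
  refine Prod.ext ?_ (Prod.ext ?_ ?_)
  · show efn.map (fun f => namesB (featureInfo.getD f (false, none)) ppl) = _
    have h := sliceChunks (efn.map (fun f => namesB (featureInfo.getD f (false, none)) ppl)) []
    simp only [List.length_nil, Nat.cast_zero, List.nil_append] at h
    exact h.symm
  · show (efn.map (fun f => namesB (featureInfo.getD f (false, none)) ppl)).map
        (fun sub => sub.map (fun _ => ([] : List Int)))
      = ((efn.map (fun f => namesB (featureInfo.getD f (false, none)) ppl)).map
          (fun l => ((l.length : Nat) : Int))).map
          (fun sz => (PySem.List.pyRange 0 sz 1).map (fun _ => ([] : List Int)))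
    simp only [List.map_map]
    apply List.map_congr_left
    intro f _
    exact (dataChunk (namesB (featureInfo.getD f (false, none)) ppl)).symm
  · show indsAll 0 (efn.map (fun f => namesB (featureInfo.getD f (false, none)) ppl)) = _
    exact (indsChunks (efn.map (fun f => namesB (featureInfo.getD f (false, none)) ppl)) 0).symm
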